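-- pv_equiv track=rewrite | github.com/Amol2709/DSA | Arrays/closestMinMax.py | solve
-- ===== SOURCE A (Python) =====
-- def solve(A):
--     import sys
--     A_length = len(A)
--
--     if A_length == 1:
--         return 1
--
--     min_val,max_val = min(A),max(A)
--
--     ans = sys.maxsize
--     min_index = -1
--     max_index = -1
--
--     for index in range(A_length):
--
--         if A[index] == min_val:
--             min_index = index
--
--         if A[index] == max_val:
--             max_index = index
--         if min_index!=-1 and max_index!=-1:
--             ans = min(ans, abs(max_index-min_index)+1)
--
--     return max(1,ans)
-- ===== SOURCE B (Python) =====
-- def solve(A):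
--     if len(A) == 1:
--         return 1
--     lo, hi = min(A), max(A)
--     P = [i for i in range(len(A)) if A[i] == lo]
--     Q = [i for i in range(len(A)) if A[i] == hi]
--     best = None
--     i = j = 0
--     while i < len(P) and j < len(Q):
--         gap = abs(P[i] - Q[j])
--         if best is None or gap < best:
--             best = gap
--         if P[i] < Q[j]:
--             i += 1
--         else:
--             j += 1
--     return max(1, best + 1)
-- ===== Notes on version B (the rewrite author's own statement) =====
-- stated objective: alternative
-- what changed: Replaces A's fused incremental scan (last-seen min/max indices updated and compared at every element) by an index-table decomposition: build the lists of min-positions and max-positions, then merge them with two pointers to find the minimum gap.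
import Mathlib
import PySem

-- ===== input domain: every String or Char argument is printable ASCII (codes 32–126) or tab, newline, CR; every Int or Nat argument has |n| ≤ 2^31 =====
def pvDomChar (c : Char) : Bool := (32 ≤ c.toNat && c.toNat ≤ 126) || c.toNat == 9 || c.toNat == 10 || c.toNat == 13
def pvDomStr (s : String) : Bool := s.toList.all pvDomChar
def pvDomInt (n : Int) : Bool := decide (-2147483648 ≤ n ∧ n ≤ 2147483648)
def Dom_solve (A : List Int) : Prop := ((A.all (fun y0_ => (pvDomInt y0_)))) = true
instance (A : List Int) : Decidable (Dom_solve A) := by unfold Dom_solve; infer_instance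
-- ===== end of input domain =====

-- B replaces A's fused scan by min/max position tables merged with two pointers; equivalence of return values is proved on nonempty lists.

-- ===== PORT A =====
def MAXSZ : Int := 9223372036854775807  -- sys.maxsize

def stepA (A : List Int) (minv maxv : Int) (st : Int × Int × Int) (index : Int) : Int × Int × Int :=
  let mi := if PySem.List.pyGetD A index 0 = minv then index else st.2.1
  let ma := if PySem.List.pyGetD A index 0 = maxv then index else st.2.2
  let ans := if mi ≠ -1 ∧ ma ≠ -1 then min st.1 (|ma - mi| + 1) else st.1
  (ans, mi, ma)

def solve (A : List Int) : Int :=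
  if A.length = 1 then 1
  else
    match PySem.List.min? A (fun x => x), PySem.List.max? A (fun x => x) with
    | some minv, some maxv =>
      let st := (PySem.List.pyRange 0 (A.length : Int) 1).foldl (stepA A minv maxv) (MAXSZ, -1, -1)
      max 1 st.1
    | _, _ => 0   -- unreachable under Pre_solve (min/max of [] raise ValueError)

-- ===== PORT B =====
-- the two-pointer merge: i, j index into the position lists P, Q (Python's while loop)
def tp (P Q : List Int) (i j : Nat) (best : Option Int) : Option Int :=
  if h : i < P.length ∧ j < Q.length then
    let gap := |P[i]'h.1 - Q[j]'h.2|
    let best' := match best with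
      | none => some gap
      | some b => if gap < b then some gap else some b
    if P[i]'h.1 < Q[j]'h.2 then tp P Q (i+1) j best' else tp P Q i (j+1) best'
  else best
termination_by P.length - i + (Q.length - j)
decreasing_by all_goals omega

def solve_alt (A : List Int) : Int :=
  if A.length = 1 then 1
  else
    match PySem.List.min? A (fun x => x), PySem.List.max? A (fun x => x) with
    | some lo, some hi =>
      let P := (PySem.List.pyRange 0 (A.length : Int) 1).filter (fun i => PySem.List.pyGetD A i 0 = lo)
      let Q := (PySem.List.pyRange 0 (A.length : Int) 1).filter (fun i => PySem.List.pyGetD A i 0 = hi)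
      match tp P Q 0 0 none with
      | some best => max 1 (best + 1)
      | none => 0   -- unreachable: P and Q are nonempty, so best is not None
    | none, _ => 0   -- unreachable under Pre_solve (min() of [] raises ValueError)
    | _, none => 0   -- unreachable under Pre_solve

-- ===== PRECONDITION & SPEC =====
-- A ≠ []: min()/max() of an empty list raise ValueError in both A and B.
-- length ≤ sys.maxsize: A's sentinel ans = sys.maxsize is only a correct "infinity" while every
-- window length stays below it; no input of that length is physically realisable in Python, so no
-- input on which A actually returns is excluded by this cap.
def Pre_solve (A : List Int) : Prop := A ≠ [] ∧ (A.length : Int) ≤ 9223372036854775807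
instance (A : List Int) : Decidable (Pre_solve A) := by unfold Pre_solve; infer_instance

def pvWitness_solve : List Int := [0, 5, 0]

def Spec_solve (A : List Int) (out : Int) : Prop := out = solve_alt A
instance (A : List Int) (out : Int) : Decidable (Spec_solve A out) := by unfold Spec_solve; infer_instance

-- ===== CLAIM (what is proved, stated in full; the proofs are below) =====
def Claim_equal_solve : Prop := ∀ (A : List Int), Dom_solve A → Pre_solve A → Spec_solve A (solve A)

-- ===== LEMMAS AND PROOFS =====

-- positions < k holding value v, as A's loop and B's table construction both see them
def posUpTo (A : List Int) (v : Int) (k : Int) : List Int :=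
  (PySem.List.pyRange 0 k 1).filter (fun i => PySem.List.pyGetD A i 0 = v)

-- last element of a list, -1 if empty (the shape of A's min_index / max_index)
def lastD (xs : List Int) : Int := xs.foldl (fun _ i => i) (-1)

-- all pairwise |p - q| gaps
def gapsOf (P Q : List Int) : List Int := P.flatMap (fun p => Q.map (fun q => |p - q|))

-- what A's ans variable holds, as a function of the position tables
def ansS (P Q : List Int) : Int :=
  match PySem.List.min? (gapsOf P Q) (fun y => y) with
  | none => MAXSZ
  | some g => min MAXSZ (g + 1)

-- option-min (the shape of B's best variable)
def omin : Option Int → Option Int → Option Int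
  | none, b => b
  | some a, none => some a
  | some a, some b => some (min a b)

lemma mem_gapsOf {g : Int} {P Q : List Int} :
    g ∈ gapsOf P Q ↔ ∃ p ∈ P, ∃ q ∈ Q, g = |p - q| := by
  simp [gapsOf, List.mem_flatMap, List.mem_map, eq_comm]


lemma min?_eq_of {xs : List Int} {m : Int} (hm : m ∈ xs) (hmin : ∀ y ∈ xs, m ≤ y) :
    PySem.List.min? xs (fun x => x) = some m := by
  cases h : PySem.List.min? xs (fun x => x) with
  | none => rw [(PySem.List.min?_eq_none_iff xs _).mp h] at hm; simp at hm
  | some m' =>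
    have h1 := PySem.List.min?_isMin h m hm
    have h2 := hmin m' (PySem.List.min?_mem h)
    simp only [Option.some.injEq]; omega


lemma lastD_append (xs : List Int) (x : Int) : lastD (xs ++ [x]) = x := by
  simp [lastD, List.foldl_append]

lemma lastD_max {xs : List Int} (h : xs.Pairwise (· ≤ ·)) (hne : xs ≠ []) :
    lastD xs ∈ xs ∧ ∀ x ∈ xs, x ≤ lastD xs := by
  induction xs with
  | nil => simp at hne
  | cons x xs ih =>
    cases hxs : xs with
    | nil => simp [lastD]
    | cons y ys =>
      subst hxs
      have hne' : (y :: ys) ≠ [] := by simp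
      have heq : lastD (x :: (y :: ys)) = lastD (y :: ys) := rfl
      rcases ih h.of_cons hne' with ⟨h1, h2⟩
      refine ⟨by rw [heq]; exact List.mem_cons_of_mem _ h1, ?_⟩
      intro z hz
      rw [heq]
      rcases List.mem_cons.mp hz with rfl | hz'
      · exact le_trans (List.rel_of_pairwise_cons h h1) le_rfl
      · exact h2 z hz'


lemma posUpTo_sorted (A : List Int) (v k : Int) : (posUpTo A v k).Pairwise (· ≤ ·) := by
  exact ((PySem.List.pairwise_lt_pyRange_one 0 k).filter _).imp le_of_lt


lemma mem_posUpTo_lt {A : List Int} {v k x : Int} (hx : x ∈ posUpTo A v k) : 0 ≤ x ∧ x < k := by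
  exact PySem.List.mem_pyRange_one.mp (List.mem_of_mem_filter hx)


lemma posUpTo_succ (A : List Int) (v : Int) (k : Nat) :
    posUpTo A v ((k : Int) + 1)
      = posUpTo A v k ++ (if PySem.List.pyGetD A (k : Int) 0 = v then [(k : Int)] else []) := by
  unfold posUpTo
  rw [PySem.List.pyRange_one_succ_right (by positivity), List.filter_append]
  simp [List.filter]
  split_ifs with h <;> simp_all



lemma gapsOf_nil_right (P : List Int) : gapsOf P [] = [] := by simp [gapsOf]


-- appending a new rightmost min-position x: the new minimum gap against Q is x - lq
lemma min?_gaps_addP {P Q : List Int} {x lq : Int} (hlq : lq ∈ Q)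
    (hmaxq : ∀ q ∈ Q, q ≤ lq) (hqlt : ∀ q ∈ Q, q < x) :
    PySem.List.min? (gapsOf (P ++ [x]) Q) (fun y => y)
      = some (match PySem.List.min? (gapsOf P Q) (fun y => y) with
              | none => x - lq | some g => min g (x - lq)) := by
  have hxlq : |x - lq| = x - lq := abs_of_pos (by have := hqlt lq hlq; omega)
  have hrow : ∀ q ∈ Q, x - lq ≤ |x - q| := by
    intro q hq
    have h1 := hmaxq q hq
    have h2 := hqlt q hq
    rw [abs_of_pos (by omega)]; omega
  cases h : PySem.List.min? (gapsOf P Q) (fun y => y) with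
  | none =>
    have hemp : gapsOf P Q = [] := (PySem.List.min?_eq_none_iff _ _).mp h
    apply min?_eq_of
    · exact mem_gapsOf.mpr ⟨x, by simp, lq, hlq, by rw [hxlq]⟩
    · intro y hy
      rcases mem_gapsOf.mp hy with ⟨p, hp, q, hq, rfl⟩
      show x - lq ≤ |p - q|
      rcases List.mem_append.mp hp with hp' | hp'
      · exact absurd (mem_gapsOf.mpr ⟨p, hp', q, hq, rfl⟩) (by simp [hemp])
      · simp only [List.mem_singleton] at hp'; subst hp'
        exact hrow q hq
  | some g =>
    apply min?_eq_of
    · show min g (x - lq) ∈ gapsOf (P ++ [x]) Q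
      rcases le_total g (x - lq) with hle | hle
      · rw [min_eq_left hle]
        have := PySem.List.min?_mem h
        rcases mem_gapsOf.mp this with ⟨p, hp, q, hq, rfl⟩
        exact mem_gapsOf.mpr ⟨p, List.mem_append_left _ hp, q, hq, rfl⟩
      · rw [min_eq_right hle]
        exact mem_gapsOf.mpr ⟨x, by simp, lq, hlq, by rw [hxlq]⟩
    · intro y hy
      show min g (x - lq) ≤ y
      rcases mem_gapsOf.mp hy with ⟨p, hp, q, hq, rfl⟩
      rcases List.mem_append.mp hp with hp' | hp'
      · have := PySem.List.min?_isMin h _ (mem_gapsOf.mpr ⟨p, hp', q, hq, rfl⟩)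
        simp only at this; omega
      · simp only [List.mem_singleton] at hp'; subst hp'
        have := hrow q hq; omega


lemma min?_gaps_addQ {P Q : List Int} {x lp : Int} (hlp : lp ∈ P)
    (hmaxp : ∀ p ∈ P, p ≤ lp) (hplt : ∀ p ∈ P, p < x) :
    PySem.List.min? (gapsOf P (Q ++ [x])) (fun y => y)
      = some (match PySem.List.min? (gapsOf P Q) (fun y => y) with
              | none => x - lp | some g => min g (x - lp)) := by
  have hxlp : |lp - x| = x - lp := by
    have := hplt lp hlp; rw [abs_sub_comm, abs_of_pos (by omega)]
  have hrow : ∀ p ∈ P, x - lp ≤ |p - x| := by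
    intro p hp
    have h1 := hmaxp p hp
    have h2 := hplt p hp
    rw [abs_sub_comm, abs_of_pos (by omega)]; omega
  cases h : PySem.List.min? (gapsOf P Q) (fun y => y) with
  | none =>
    have hemp : gapsOf P Q = [] := (PySem.List.min?_eq_none_iff _ _).mp h
    apply min?_eq_of
    · exact mem_gapsOf.mpr ⟨lp, hlp, x, by simp, by rw [hxlp]⟩
    · intro y hy
      show x - lp ≤ y
      rcases mem_gapsOf.mp hy with ⟨p, hp, q, hq, rfl⟩
      rcases List.mem_append.mp hq with hq' | hq'
      · exact absurd (mem_gapsOf.mpr ⟨p, hp, q, hq', rfl⟩) (by simp [hemp])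
      · simp only [List.mem_singleton] at hq'; subst hq'
        exact hrow p hp
  | some g =>
    apply min?_eq_of
    · show min g (x - lp) ∈ gapsOf P (Q ++ [x])
      rcases le_total g (x - lp) with hle | hle
      · rw [min_eq_left hle]
        rcases mem_gapsOf.mp (PySem.List.min?_mem h) with ⟨p, hp, q, hq, rfl⟩
        exact mem_gapsOf.mpr ⟨p, hp, q, List.mem_append_left _ hq, rfl⟩
      · rw [min_eq_right hle]
        exact mem_gapsOf.mpr ⟨lp, hlp, x, by simp, by rw [hxlp]⟩
    · intro y hy
      show min g (x - lp) ≤ y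
      rcases mem_gapsOf.mp hy with ⟨p, hp, q, hq, rfl⟩
      rcases List.mem_append.mp hq with hq' | hq'
      · have := PySem.List.min?_isMin h _ (mem_gapsOf.mpr ⟨p, hp, q, hq', rfl⟩)
        simp only at this; omega
      · simp only [List.mem_singleton] at hq'; subst hq'
        have := hrow p hp; omega


lemma min?_gaps_addBoth {P Q : List Int} {x : Int} :
    PySem.List.min? (gapsOf (P ++ [x]) (Q ++ [x])) (fun y => y) = some 0 := by
  apply min?_eq_of
  · exact mem_gapsOf.mpr ⟨x, by simp, x, by simp, by simp⟩
  · intro y hy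
    rcases mem_gapsOf.mp hy with ⟨p, _, q, _, rfl⟩
    exact abs_nonneg _


lemma ansS_ge_one (P Q : List Int) : 1 ≤ ansS P Q := by
  unfold ansS
  cases h : PySem.List.min? (gapsOf P Q) (fun y => y) with
  | none => norm_num [MAXSZ]
  | some g =>
    rcases mem_gapsOf.mp (PySem.List.min?_mem h) with ⟨p, _, q, _, rfl⟩
    have := abs_nonneg (p - q)
    simp only [MAXSZ]; omega



-- A's loop invariant
lemma loopA (A : List Int) (minv maxv : Int) (k : Nat) :
    (PySem.List.pyRange 0 (k : Int) 1).foldl (stepA A minv maxv) (MAXSZ, -1, -1)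
      = (ansS (posUpTo A minv k) (posUpTo A maxv k),
         lastD (posUpTo A minv k), lastD (posUpTo A maxv k)) := by
  induction k with
  | zero =>
    simp [PySem.List.pyRange_one_eq_nil (le_refl (0 : Int)), posUpTo, ansS, gapsOf, lastD,
      PySem.List.min?]
  | succ k ih =>
    have hcast : ((k + 1 : Nat) : Int) = (k : Int) + 1 := by push_cast; ring
    rw [hcast, PySem.List.pyRange_one_succ_right (by positivity), List.foldl_append, ih,
      posUpTo_succ, posUpTo_succ]
    have hstep : ∀ (P Q : List Int),
        (∀ p ∈ P, 0 ≤ p ∧ p < (k : Int)) → (∀ q ∈ Q, 0 ≤ q ∧ q < (k : Int)) →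
        P.Pairwise (· ≤ ·) → Q.Pairwise (· ≤ ·) →
        List.foldl (stepA A minv maxv) (ansS P Q, lastD P, lastD Q) [(k : Int)]
          = (ansS (P ++ (if PySem.List.pyGetD A (k : Int) 0 = minv then [(k : Int)] else []))
                  (Q ++ (if PySem.List.pyGetD A (k : Int) 0 = maxv then [(k : Int)] else [])),
             lastD (P ++ (if PySem.List.pyGetD A (k : Int) 0 = minv then [(k : Int)] else [])),
             lastD (Q ++ (if PySem.List.pyGetD A (k : Int) 0 = maxv then [(k : Int)] else []))) := by
      intro P Q hPb hQb hPs hQs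
      by_cases hm : PySem.List.pyGetD A (k : Int) 0 = minv <;>
        by_cases hx : PySem.List.pyGetD A (k : Int) 0 = maxv
      · -- k is both a min and a max position
        simp only [List.foldl_cons, List.foldl_nil, stepA, if_pos hm, if_pos hx, lastD_append]
        have hcond : ((k : Int) ≠ -1 ∧ (k : Int) ≠ -1) := by
          constructor <;> omega
        rw [if_pos hcond]
        have h1 : ansS (P ++ [(k : Int)]) (Q ++ [(k : Int)]) = 1 := by
          unfold ansS; rw [min?_gaps_addBoth]; simp [MAXSZ]
        simp only [h1]
        have h2 := ansS_ge_one P Q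
        have h3 : |(k : Int) - (k : Int)| = 0 := by simp
        rw [h3]
        congr 1
        omega
      · -- k is only a min position
        simp only [List.foldl_cons, List.foldl_nil, stepA, if_pos hm, if_neg hx,
          List.append_nil, lastD_append]
        by_cases hQe : Q = []
        · subst hQe
          have hcond : ¬ ((k : Int) ≠ -1 ∧ lastD ([] : List Int) ≠ -1) := by
            simp [lastD]
          rw [if_neg hcond]
          have he : ansS (P ++ [(k : Int)]) [] = ansS P [] := by
            unfold ansS; rw [gapsOf_nil_right, gapsOf_nil_right]
          rw [he]
        · rcases lastD_max hQs hQe with ⟨hmem, hmax⟩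
          have hlt : ∀ q ∈ Q, q < (k : Int) := fun q hq => (hQb q hq).2
          have hge : 0 ≤ lastD Q := (hQb _ hmem).1
          have hcond : ((k : Int) ≠ -1 ∧ lastD Q ≠ -1) := by constructor <;> omega
          rw [if_pos hcond]
          congr 1
          have habs : |lastD Q - (k : Int)| = (k : Int) - lastD Q := by
            have := hlt _ hmem; rw [abs_sub_comm, abs_of_pos (by omega)]
          rw [habs]
          unfold ansS
          rw [min?_gaps_addP hmem hmax hlt]
          cases PySem.List.min? (gapsOf P Q) (fun y => y)
          all_goals dsimp only
          all_goals simp only [min_def]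
          all_goals split_ifs
          all_goals first | rfl | omega | linarith
      · -- k is only a max position
        simp only [List.foldl_cons, List.foldl_nil, stepA, if_neg hm, if_pos hx,
          List.append_nil, lastD_append]
        by_cases hPe : P = []
        · subst hPe
          have hcond : ¬ (lastD ([] : List Int) ≠ -1 ∧ (k : Int) ≠ -1) := by
            simp [lastD]
          rw [if_neg hcond]
          have he : ansS [] (Q ++ [(k : Int)]) = ansS ([] : List Int) Q := by
            unfold ansS; simp [gapsOf]
          rw [he]
        · rcases lastD_max hPs hPe with ⟨hmem, hmax⟩
          have hlt : ∀ p ∈ P, p < (k : Int) := fun p hp => (hPb p hp).2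
          have hge : 0 ≤ lastD P := (hPb _ hmem).1
          have hcond : (lastD P ≠ -1 ∧ (k : Int) ≠ -1) := by constructor <;> omega
          rw [if_pos hcond]
          congr 1
          have habs : |(k : Int) - lastD P| = (k : Int) - lastD P := by
            have := hlt _ hmem; rw [abs_of_pos (by omega)]
          rw [habs]
          unfold ansS
          rw [min?_gaps_addQ hmem hmax hlt]
          cases PySem.List.min? (gapsOf P Q) (fun y => y)
          all_goals dsimp only
          all_goals simp only [min_def]
          all_goals split_ifs
          all_goals first | rfl | omega | linarith
      · -- k is neither
        simp only [List.foldl_cons, List.foldl_nil, stepA, if_neg hm, if_neg hx,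
          List.append_nil]
        by_cases hPe : P = []
        · subst hPe
          have hcond : ¬ (lastD ([] : List Int) ≠ -1 ∧ lastD Q ≠ -1) := by simp [lastD]
          rw [if_neg hcond]
        · by_cases hQe : Q = []
          · subst hQe
            have hcond : ¬ (lastD P ≠ -1 ∧ lastD ([] : List Int) ≠ -1) := by simp [lastD]
            rw [if_neg hcond]
          · rcases lastD_max hPs hPe with ⟨hmemP, _⟩
            rcases lastD_max hQs hQe with ⟨hmemQ, _⟩
            have hgeP : 0 ≤ lastD P := (hPb _ hmemP).1
            have hgeQ : 0 ≤ lastD Q := (hQb _ hmemQ).1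
            have hcond : (lastD P ≠ -1 ∧ lastD Q ≠ -1) := by constructor <;> omega
            rw [if_pos hcond]
            congr 1
            have hg : |lastD P - lastD Q| ∈ gapsOf P Q := mem_gapsOf.mpr ⟨_, hmemP, _, hmemQ, rfl⟩
            cases h : PySem.List.min? (gapsOf P Q) (fun y => y) with
            | none =>
              rw [(PySem.List.min?_eq_none_iff _ _).mp h] at hg; simp at hg
            | some g =>
              have hle := PySem.List.min?_isMin h _ hg
              simp only at hle
              have habs : |lastD P - lastD Q| = |lastD Q - lastD P| := abs_sub_comm _ _
              rw [habs] at hle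
              unfold ansS
              rw [h]
              dsimp only
              simp only [min_def]
              split_ifs <;> omega
    exact hstep _ _ (fun p hp => mem_posUpTo_lt hp) (fun q hq => mem_posUpTo_lt hq)
      (posUpTo_sorted A minv k) (posUpTo_sorted A maxv k)


-- head of a suffix bounds the suffix below (sorted list)
lemma head_le_of_drop {Q : List Int} (h : Q.Pairwise (· ≤ ·)) {j : Nat} (hj : j < Q.length) :
    ∀ q ∈ Q.drop j, Q[j] ≤ q := by
  intro q hq
  have hd : Q.drop j = Q[j] :: Q.drop (j + 1) := by
    rw [List.drop_eq_getElem_cons hj]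
  have hp : (Q.drop j).Pairwise (· ≤ ·) := h.sublist (List.drop_sublist _ _)
  rw [hd] at hq hp
  rcases List.mem_cons.mp hq with rfl | hq'
  · exact le_rfl
  · exact List.rel_of_pairwise_cons hp hq'


-- the new head min-gap, adding a column q0 on the left of Q's remainder
lemma min?_gaps_consQ {P Q : List Int} {q0 p0 : Int} (hp0 : p0 ∈ P)
    (hpmin : ∀ p ∈ P, p0 ≤ p) (h : q0 ≤ p0) :
    PySem.List.min? (gapsOf P (q0 :: Q)) (fun y => y)
      = some (match PySem.List.min? (gapsOf P Q) (fun y => y) with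
              | none => p0 - q0 | some g => min (p0 - q0) g) := by
  have hx0 : |p0 - q0| = p0 - q0 := abs_of_nonneg (by omega)
  have hcol : ∀ p ∈ P, p0 - q0 ≤ |p - q0| := by
    intro p hp
    have h1 := hpmin p hp
    rw [abs_of_nonneg (by omega)]; omega
  cases hm : PySem.List.min? (gapsOf P Q) (fun y => y) with
  | none =>
    have hemp : gapsOf P Q = [] := (PySem.List.min?_eq_none_iff _ _).mp hm
    apply min?_eq_of
    · exact mem_gapsOf.mpr ⟨p0, hp0, q0, by simp, by rw [hx0]⟩
    · intro y hy
      show p0 - q0 ≤ y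
      rcases mem_gapsOf.mp hy with ⟨p, hp, q, hq, rfl⟩
      rcases List.mem_cons.mp hq with rfl | hq'
      · exact hcol p hp
      · exact absurd (mem_gapsOf.mpr ⟨p, hp, q, hq', rfl⟩) (by simp [hemp])
  | some g =>
    apply min?_eq_of
    · show min (p0 - q0) g ∈ gapsOf P (q0 :: Q)
      rcases le_total (p0 - q0) g with hle | hle
      · rw [min_eq_left hle]
        exact mem_gapsOf.mpr ⟨p0, hp0, q0, by simp, by rw [hx0]⟩
      · rw [min_eq_right hle]
        rcases mem_gapsOf.mp (PySem.List.min?_mem hm) with ⟨p, hp, q, hq, rfl⟩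
        exact mem_gapsOf.mpr ⟨p, hp, q, List.mem_cons_of_mem _ hq, rfl⟩
    · intro y hy
      show min (p0 - q0) g ≤ y
      rcases mem_gapsOf.mp hy with ⟨p, hp, q, hq, rfl⟩
      rcases List.mem_cons.mp hq with rfl | hq'
      · have := hcol p hp; omega
      · have := PySem.List.min?_isMin hm _ (mem_gapsOf.mpr ⟨p, hp, q, hq', rfl⟩)
        simp only at this; omega


lemma min?_gaps_consP {P Q : List Int} {x q0 : Int} (hq0 : q0 ∈ Q)
    (hqmin : ∀ q ∈ Q, q0 ≤ q) (h : x ≤ q0) :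
    PySem.List.min? (gapsOf (x :: P) Q) (fun y => y)
      = some (match PySem.List.min? (gapsOf P Q) (fun y => y) with
              | none => q0 - x | some g => min (q0 - x) g) := by
  have hx0 : |x - q0| = q0 - x := by rw [abs_sub_comm, abs_of_nonneg (by omega)]
  have hrow : ∀ q ∈ Q, q0 - x ≤ |x - q| := by
    intro q hq
    have h1 := hqmin q hq
    rw [abs_sub_comm, abs_of_nonneg (by omega)]; omega
  cases hm : PySem.List.min? (gapsOf P Q) (fun y => y) with
  | none =>
    have hemp : gapsOf P Q = [] := (PySem.List.min?_eq_none_iff _ _).mp hm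
    apply min?_eq_of
    · exact mem_gapsOf.mpr ⟨x, by simp, q0, hq0, by rw [hx0]⟩
    · intro y hy
      show q0 - x ≤ y
      rcases mem_gapsOf.mp hy with ⟨p, hp, q, hq, rfl⟩
      rcases List.mem_cons.mp hp with rfl | hp'
      · exact hrow q hq
      · exact absurd (mem_gapsOf.mpr ⟨p, hp', q, hq, rfl⟩) (by simp [hemp])
  | some g =>
    apply min?_eq_of
    · show min (q0 - x) g ∈ gapsOf (x :: P) Q
      rcases le_total (q0 - x) g with hle | hle
      · rw [min_eq_left hle]
        exact mem_gapsOf.mpr ⟨x, by simp, q0, hq0, by rw [hx0]⟩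
      · rw [min_eq_right hle]
        rcases mem_gapsOf.mp (PySem.List.min?_mem hm) with ⟨p, hp, q, hq, rfl⟩
        exact mem_gapsOf.mpr ⟨p, List.mem_cons_of_mem _ hp, q, hq, rfl⟩
    · intro y hy
      show min (q0 - x) g ≤ y
      rcases mem_gapsOf.mp hy with ⟨p, hp, q, hq, rfl⟩
      rcases List.mem_cons.mp hp with rfl | hp'
      · have := hrow q hq; omega
      · have := PySem.List.min?_isMin hm _ (mem_gapsOf.mpr ⟨p, hp', q, hq, rfl⟩)
        simp only at this; omega




-- B's two-pointer merge computes the minimum over all remaining pairs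
lemma tp_stop {P Q : List Int} {i j : Nat} (h : ¬ (i < P.length ∧ j < Q.length)) (best : Option Int) :
    omin best (PySem.List.min? (gapsOf (P.drop i) (Q.drop j)) (fun y => y)) = best := by
  have hemp : gapsOf (P.drop i) (Q.drop j) = [] := by
    rcases not_and_or.mp h with h' | h'
    · have : P.drop i = [] := List.drop_eq_nil_of_le (by omega)
      simp [gapsOf, this]
    · have : Q.drop j = [] := List.drop_eq_nil_of_le (by omega)
      simp [gapsOf, this]
  rw [hemp]
  have : PySem.List.min? ([] : List Int) (fun y => y) = none := by
    exact (PySem.List.min?_eq_none_iff _ _).mpr rfl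
  rw [this]
  cases best <;> rfl

lemma tp_correct {P Q : List Int} (hP : P.Pairwise (· ≤ ·)) (hQ : Q.Pairwise (· ≤ ·)) :
    ∀ (n i j : Nat) (best : Option Int), P.length - i + (Q.length - j) ≤ n →
      tp P Q i j best = omin best (PySem.List.min? (gapsOf (P.drop i) (Q.drop j)) (fun y => y)) := by
  intro n
  induction n with
  | zero =>
    intro i j best hn
    have h : ¬ (i < P.length ∧ j < Q.length) := by omega
    rw [tp, dif_neg h, tp_stop h]
  | succ n ihn =>
    intro i j best hn
    rw [tp]
    by_cases h : i < P.length ∧ j < Q.length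
    · rw [dif_pos h]
      obtain ⟨hi, hj⟩ := h
      have hdP : P.drop i = P[i] :: P.drop (i + 1) := by rw [List.drop_eq_getElem_cons hi]
      have hdQ : Q.drop j = Q[j] :: Q.drop (j + 1) := by rw [List.drop_eq_getElem_cons hj]
      have hPmin : ∀ p ∈ P.drop i, P[i] ≤ p := head_le_of_drop hP hi
      have hQmin : ∀ q ∈ Q.drop j, Q[j] ≤ q := head_le_of_drop hQ hj
      dsimp only
      by_cases hlt : P[i] < Q[j]
      · rw [if_pos hlt, ihn (i + 1) j _ (by omega)]
        have habs : |P[i] - Q[j]| = Q[j] - P[i] := by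
          rw [abs_sub_comm, abs_of_pos (by omega)]
        rw [hdP, min?_gaps_consP (by rw [hdQ]; exact List.mem_cons_self ..)
              (fun q hq => hQmin q hq) (le_of_lt hlt)]
        cases best <;>
          cases hm : PySem.List.min? (gapsOf (P.drop (i + 1)) (Q.drop j)) (fun y => y) <;>
            dsimp only <;> (try split_ifs) <;> (try simp only [omin, habs, min_def, Option.some.injEq]) <;> (try split_ifs) <;>
              first | rfl | omega | linarith
      · rw [if_neg hlt, ihn i (j + 1) _ (by omega)]
        have habs : |P[i] - Q[j]| = P[i] - Q[j] := abs_of_nonneg (by omega)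
        rw [hdQ, min?_gaps_consQ (by rw [hdP]; exact List.mem_cons_self ..)
              (fun p hp => hPmin p hp) (by omega)]
        cases best <;>
          cases hm : PySem.List.min? (gapsOf (P.drop i) (Q.drop (j + 1))) (fun y => y) <;>
            dsimp only <;> (try split_ifs) <;> (try simp only [omin, habs, min_def, Option.some.injEq]) <;> (try split_ifs) <;>
              first | rfl | omega | linarith
    · rw [dif_neg h, tp_stop h]


-- ===== VERDICT (by name: the statement is the Claim_ definition above) =====
theorem solve_spec : Claim_equal_solve := by
  intro A hDom hPre
  obtain ⟨hne, hlen⟩ := hPre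
  unfold Spec_solve solve solve_alt
  by_cases h1 : A.length = 1
  · rw [if_pos h1, if_pos h1]
  · rw [if_neg h1, if_neg h1]
    cases hmin : PySem.List.min? A (fun x => x) with
    | none => exact absurd ((PySem.List.min?_eq_none_iff A _).mp hmin) hne
    | some minv =>
      cases hmax : PySem.List.max? A (fun x => x) with
      | none => exact absurd ((PySem.List.max?_eq_none_iff A _).mp hmax) hne
      | some maxv =>
        dsimp only
        rw [loopA A minv maxv A.length]
        have hPdef : (PySem.List.pyRange 0 (A.length : Int) 1).filter
            (fun i => PySem.List.pyGetD A i 0 = minv) = posUpTo A minv (A.length : Int) := rfl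
        have hQdef : (PySem.List.pyRange 0 (A.length : Int) 1).filter
            (fun i => PySem.List.pyGetD A i 0 = maxv) = posUpTo A maxv (A.length : Int) := rfl
        rw [hPdef, hQdef]
        have hnpos : 0 < A.length := List.length_pos_of_ne_nil hne
        -- the position tables are nonempty
        have hmemP : ∀ v : Int, v ∈ A → ∃ x, x ∈ posUpTo A v (A.length : Int) := by
          intro v hv
          obtain ⟨i, hi, hiv⟩ := List.getElem_of_mem hv
          refine ⟨(i : Int), List.mem_filter.mpr ⟨?_, ?_⟩⟩
          · exact PySem.List.mem_pyRange_one.mpr ⟨by positivity, by exact_mod_cast hi⟩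
          · simp only [PySem.List.pyGetD_natCast, decide_eq_true_eq]
            rw [List.getD_eq_getElem _ _ hi, hiv]
        obtain ⟨p0, hp0⟩ := hmemP minv (PySem.List.min?_mem hmin)
        obtain ⟨q0, hq0⟩ := hmemP maxv (PySem.List.max?_mem hmax)
        have hgne : |p0 - q0| ∈ gapsOf (posUpTo A minv (A.length : Int))
            (posUpTo A maxv (A.length : Int)) := mem_gapsOf.mpr ⟨p0, hp0, q0, hq0, rfl⟩
        cases hbest : PySem.List.min? (gapsOf (posUpTo A minv (A.length : Int))
            (posUpTo A maxv (A.length : Int))) (fun y => y) with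
        | none =>
          rw [(PySem.List.min?_eq_none_iff _ _).mp hbest] at hgne; simp at hgne
        | some best =>
          -- bound on best
          obtain ⟨p, hp, q, hq, hpq⟩ := mem_gapsOf.mp (PySem.List.min?_mem hbest)
          have hpb := mem_posUpTo_lt hp
          have hqb := mem_posUpTo_lt hq
          have hbb : best ≤ (A.length : Int) - 1 := by
            rw [hpq]
            rcases abs_cases (p - q) with ⟨he, _⟩ | ⟨he, _⟩ <;> omega
          -- A's side
          have hA : ansS (posUpTo A minv (A.length : Int)) (posUpTo A maxv (A.length : Int))
              = best + 1 := by
            unfold ansS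
            rw [hbest]
            have hM : MAXSZ = 9223372036854775807 := rfl
            dsimp only
            omega
          rw [hA]
          -- B's side
          rw [tp_correct (posUpTo_sorted A minv _) (posUpTo_sorted A maxv _)
            ((posUpTo A minv (A.length : Int)).length + (posUpTo A maxv (A.length : Int)).length)
            0 0 none (by omega)]
          simp only [List.drop_zero]
          rw [hbest]
          rfl
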